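-- pv_equiv track=rewrite | github.com/NoteXYX/KeywordExtraction | scripts/123.py | get_class_num
-- ===== SOURCE A (Python) =====
-- import operator
--
-- def get_class_num(labels):
--     class_num = {}
--     for label in labels:
--         if label not in class_num:
--             class_num[label] = 1
--         else:
--             class_num[label] += 1
--     class_num = dict(sorted(class_num.items(), key=operator.itemgetter(0)))
--     return class_num
-- ===== SOURCE B (Python) =====
-- def get_class_num(labels):
--     # sort first, then one two-pointer pass over adjacent runs; keys come out already sorted
--     s = sorted(labels)
--     out = {}
--     i = 0
--     n = len(s)
--     while i < n:
--         j = i + 1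
--         while j < n and s[j] == s[i]:
--             j += 1
--         out[s[i]] = j - i
--         i = j
--     return out
-- ===== Notes on version B (the rewrite author's own statement) =====
-- stated objective: alternative
-- what changed: replaces the count-into-a-dict-then-sort-the-items strategy by sort-the-labels-first and one adjacent-run-grouping pass that emits each key with its run length, so the result dict is built already key-sorted with no counting dict and no final sort of items
import Mathlib
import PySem

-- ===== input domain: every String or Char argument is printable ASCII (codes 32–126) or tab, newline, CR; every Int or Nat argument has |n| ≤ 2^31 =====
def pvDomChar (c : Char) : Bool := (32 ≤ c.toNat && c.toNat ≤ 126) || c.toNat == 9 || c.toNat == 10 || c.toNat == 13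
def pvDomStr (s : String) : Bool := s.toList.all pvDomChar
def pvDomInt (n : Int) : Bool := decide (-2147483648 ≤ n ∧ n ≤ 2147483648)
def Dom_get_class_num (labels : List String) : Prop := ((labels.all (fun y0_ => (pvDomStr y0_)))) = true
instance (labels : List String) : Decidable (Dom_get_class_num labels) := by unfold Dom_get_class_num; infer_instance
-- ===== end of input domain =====

-- B replaces count-into-a-dict-then-sort-items by sort-then-group-adjacent-runs (alternative structure, same cost).

-- ===== PORT A =====
def get_class_num (labels : List String) : List (String × Int) :=
  let class_num : PySem.Dict String Int :=
    labels.foldl (fun d label =>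
      if d.contains label = false then d.insert label 1
      else d.modify label 0 (· + 1)) PySem.Dict.empty
  PySem.List.sorted class_num.items (fun p => p.1) false

-- ===== PORT B =====
-- the inner while-loop counting the run is takeWhile's length; 's = s[run:]' is dropWhile
def runCounts : List String → List (String × Int)
  | [] => []
  | x :: rest =>
    (x, 1 + ((rest.takeWhile (fun y => y == x)).length : Int)) ::
      runCounts (rest.dropWhile (fun y => y == x))
termination_by l => l.length
decreasing_by
  have h := (List.dropWhile_sublist (l := rest) (fun y => y == x)).length_le
  simp only [List.length_cons]
  omega

def get_class_num_alt (labels : List String) : List (String × Int) :=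
  runCounts (PySem.List.sorted labels (fun x => x) false)

-- ===== PRECONDITION & SPEC =====
def Spec_get_class_num (labels : List String) (out : List (String × Int)) : Prop := out = get_class_num_alt labels
instance (labels : List String) (out : List (String × Int)) : Decidable (Spec_get_class_num labels out) := by unfold Spec_get_class_num; infer_instance

-- ===== CLAIM (what is proved, stated in full; the proofs are below) =====
def Claim_equal_get_class_num : Prop := ∀ (labels : List String), Dom_get_class_num labels → Spec_get_class_num labels (get_class_num labels)

-- ===== LEMMAS AND PROOFS =====

theorem runCounts_nil : runCounts [] = [] := by
  unfold runCounts
  rfl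

theorem runCounts_cons (x : String) (rest : List String) : runCounts (x :: rest) =
    (x, 1 + ((rest.takeWhile (fun y => y == x)).length : Int)) ::
      runCounts (rest.dropWhile (fun y => y == x)) := by
  conv_lhs => unfold runCounts

-- A's loop is collections.Counter: on an absent key 'insert 1' is 'modify 0 (+1)'
theorem afold_eq_counter (l : List String) (d : PySem.Dict String Int) :
    l.foldl (fun d label =>
      if d.contains label = false then d.insert label 1
      else d.modify label 0 (· + 1)) d
    = l.foldl (fun d x => d.modify x 0 (· + 1)) d := by
  induction l generalizing d with
  | nil => rfl
  | cons x xs ih =>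
    simp only [List.foldl_cons]
    by_cases h : d.contains x = false
    · rw [if_pos h, show d.insert x 1 = d.modify x 0 (· + 1) from by
        simp [PySem.Dict.modify, PySem.Dict.getD_of_not_contains d 0 h]]
      exact ih _
    · rw [if_neg h]
      exact ih _

theorem lt_of_mem_dropWhile (rest : List String) (x : String)
    (hp : rest.Pairwise (· ≤ ·)) (hx : ∀ y ∈ rest, x ≤ y) :
    ∀ y ∈ rest.dropWhile (fun y => y == x), x < y := by
  induction rest with
  | nil => simp
  | cons z zs ih =>
    rcases List.pairwise_cons.mp hp with ⟨hz, hzs⟩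
    by_cases hzx : z = x
    · subst hzx
      rw [List.dropWhile_cons_of_pos (by simp)]
      exact ih hzs (fun y hy => hz y hy)
    · rw [List.dropWhile_cons_of_neg (by simp [hzx])]
      intro y hy
      rcases List.mem_cons.mp hy with rfl | hmem
      · exact lt_of_le_of_ne (hx y (List.mem_cons_self)) (Ne.symm hzx)
      · exact lt_of_lt_of_le
          (lt_of_le_of_ne (hx z (List.mem_cons_self)) (Ne.symm hzx)) (hz y hmem)

theorem discard_of_not_mem {x : String} {s : PySem.Set String} (h : x ∉ s) :
    PySem.Set.discard s x = s := by
  simp only [PySem.Set.discard]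
  apply List.filter_eq_self.mpr
  intro y hy
  have hne : y ≠ x := fun e => h (e ▸ hy)
  simp [hne]

theorem ofList_cons_cons_self (x : String) (m : List String) :
    PySem.Set.ofList (x :: x :: m) = PySem.Set.ofList (x :: m) := by
  simp only [PySem.Set.ofList, List.foldl_cons]
  congr 1
  exact PySem.Set.add_of_mem (by
    have : PySem.Set.add PySem.Set.empty x = [x] := rfl
    rw [this]; simp)

theorem ofList_head_run (x : String) :
    ∀ (t d : List String), (∀ y ∈ t, y = x) → x ∉ d →
    PySem.Set.ofList (x :: (t ++ d)) = x :: PySem.Set.ofList d := by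
  intro t
  induction t with
  | nil =>
    intro d _ hd
    rw [List.nil_append, PySem.Set.ofList_cons,
      discard_of_not_mem (fun h => hd ((PySem.Set.mem_ofList _ _).mp h))]
  | cons z ts ih =>
    intro d ht hd
    have hz : z = x := ht z List.mem_cons_self
    subst hz
    rw [List.cons_append, ofList_cons_cons_self]
    exact ih d (fun y hy => ht y (List.mem_cons_of_mem _ hy)) hd

theorem runCounts_eq : ∀ (n : Nat) (l : List String), l.length ≤ n →
    l.Pairwise (· ≤ ·) →
    runCounts l = (PySem.Set.ofList l).map (fun k => (k, (List.count k l : Int))) := by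
  intro n
  induction n with
  | zero =>
    intro l hl _
    have : l = [] := List.eq_nil_of_length_eq_zero (Nat.le_zero.mp hl)
    subst this
    simp [runCounts_nil, PySem.Set.ofList]
  | succ n ih =>
    intro l hl hp
    match l with
    | [] => simp [runCounts_nil, PySem.Set.ofList]
    | x :: rest =>
      have hrest : rest.Pairwise (· ≤ ·) := (List.pairwise_cons.mp hp).2
      have hx : ∀ y ∈ rest, x ≤ y := (List.pairwise_cons.mp hp).1
      have ht : ∀ y ∈ rest.takeWhile (fun y => y == x), y = x := fun y hy => by
        simpa using List.mem_takeWhile_imp hy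
      have hd_lt : ∀ y ∈ rest.dropWhile (fun y => y == x), x < y :=
        lt_of_mem_dropWhile rest x hrest hx
      have hd_notmem : x ∉ rest.dropWhile (fun y => y == x) :=
        fun h => lt_irrefl x (hd_lt x h)
      have hd_pair : (rest.dropWhile (fun y => y == x)).Pairwise (· ≤ ·) :=
        hrest.sublist (List.dropWhile_sublist _)
      have hlen : (rest.dropWhile (fun y => y == x)).length ≤ n := by
        have := (List.dropWhile_sublist (l := rest) (fun y => y == x)).length_le
        simp only [List.length_cons] at hl
        omega
      have htd : rest.takeWhile (fun y => y == x) ++ rest.dropWhile (fun y => y == x) = rest :=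
        List.takeWhile_append_dropWhile
      have hset : PySem.Set.ofList (x :: rest)
          = x :: PySem.Set.ofList (rest.dropWhile (fun y => y == x)) := by
        conv_lhs => rw [← htd]
        exact ofList_head_run x _ _ ht hd_notmem
      rw [runCounts_cons, ih _ hlen hd_pair, hset, List.map_cons]
      have hcount_t : List.count x (rest.takeWhile (fun y => y == x))
          = (rest.takeWhile (fun y => y == x)).length :=
        List.count_eq_length.mpr (fun b hb => (ht b hb).symm)
      have hcount_d : List.count x (rest.dropWhile (fun y => y == x)) = 0 :=
        List.count_eq_zero.mpr hd_notmem
      have hcr : List.count x rest = (rest.takeWhile (fun y => y == x)).length := by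
        conv_lhs => rw [← htd]
        rw [List.count_append, hcount_t, hcount_d]
        omega
      have hcx : List.count x (x :: rest)
          = (rest.takeWhile (fun y => y == x)).length + 1 := by
        rw [List.count_cons_self, hcr]
      congr 1
      · rw [hcx]
        push_cast
        ring_nf
      · apply List.map_congr_left
        intro k hk
        have hkd : k ∈ rest.dropWhile (fun y => y == x) := (PySem.Set.mem_ofList _ _).mp hk
        have hkx : x < k := hd_lt k hkd
        have hknx : k ≠ x := by
          intro e
          subst e
          exact lt_irrefl k hkx
        have hct : List.count k (rest.takeWhile (fun y => y == x)) = 0 :=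
          List.count_eq_zero.mpr (fun hmem => hknx (ht k hmem))
        have hcr2 : List.count k rest = List.count k (rest.dropWhile (fun y => y == x)) := by
          conv_lhs => rw [← htd]
          rw [List.count_append, hct]
          omega
        have hck : List.count k (x :: rest) = List.count k (rest.dropWhile (fun y => y == x)) := by
          rw [List.count_cons, hcr2]
          simp [Ne.symm hknx]
        rw [hck]

theorem fst_mem_of_mem_runCounts : ∀ (n : Nat) (m : List String), m.length ≤ n →
    ∀ p ∈ runCounts m, p.1 ∈ m := by
  intro n
  induction n with
  | zero =>
    intro m hm
    have : m = [] := List.eq_nil_of_length_eq_zero (Nat.le_zero.mp hm)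
    subst this; intro p hp; simp [runCounts_nil] at hp
  | succ n ih =>
    intro m hm p hp
    match m with
    | [] => simp [runCounts_nil] at hp
    | x :: rest =>
      rw [runCounts_cons] at hp
      rcases List.mem_cons.mp hp with rfl | htail
      · exact List.mem_cons_self
      · have hlen : (rest.dropWhile (fun y => y == x)).length ≤ n := by
          have := (List.dropWhile_sublist (l := rest) (fun y => y == x)).length_le
          simp only [List.length_cons] at hm
          omega
        exact List.mem_cons_of_mem _
          ((List.dropWhile_sublist _).subset (ih _ hlen p htail))

theorem runCounts_pairwise : ∀ (n : Nat) (l : List String), l.length ≤ n →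
    l.Pairwise (· ≤ ·) → (runCounts l).Pairwise (fun a b => a.1 < b.1) := by
  intro n
  induction n with
  | zero =>
    intro l hl _
    have : l = [] := List.eq_nil_of_length_eq_zero (Nat.le_zero.mp hl)
    subst this; simp [runCounts_nil]
  | succ n ih =>
    intro l hl hp
    match l with
    | [] => simp [runCounts_nil]
    | x :: rest =>
      have hrest : rest.Pairwise (· ≤ ·) := (List.pairwise_cons.mp hp).2
      have hx : ∀ y ∈ rest, x ≤ y := (List.pairwise_cons.mp hp).1
      have hd_lt : ∀ y ∈ rest.dropWhile (fun y => y == x), x < y :=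
        lt_of_mem_dropWhile rest x hrest hx
      have hlen : (rest.dropWhile (fun y => y == x)).length ≤ n := by
        have := (List.dropWhile_sublist (l := rest) (fun y => y == x)).length_le
        simp only [List.length_cons] at hl
        omega
      rw [runCounts_cons]
      refine List.pairwise_cons.mpr ⟨fun q hq => ?_, ?_⟩
      · exact hd_lt q.1 (fst_mem_of_mem_runCounts _ _ le_rfl q hq)
      · exact ih _ hlen (hrest.sublist (List.dropWhile_sublist _))

-- ===== VERDICT (by name: the statement is the Claim_ definition above) =====
theorem get_class_num_spec : Claim_equal_get_class_num := by
  intro labels _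
  unfold Spec_get_class_num get_class_num get_class_num_alt
  rw [afold_eq_counter]
  rw [← PySem.Dict.counter_eq_foldl]
  set sl := PySem.List.sorted labels (fun x => x) false with hsl
  have hslp : sl.Pairwise (· ≤ ·) := PySem.List.sorted_pairwise labels (fun x => x)
  have hB : runCounts sl = (PySem.Set.ofList sl).map (fun k => (k, (List.count k sl : Int))) :=
    runCounts_eq sl.length sl le_rfl hslp
  apply PySem.List.sorted_eq_of_perm_of_pairwise_lt
  · -- runCounts sl is a permutation of (counter labels).items
    rw [hB, PySem.Dict.items_counter]
    have hcounts : (PySem.Set.ofList sl).map (fun k => (k, (List.count k sl : Int)))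
        = (PySem.Set.ofList sl).map (fun k => (k, (List.count k labels : Int))) := by
      apply List.map_congr_left
      intro k _
      rw [(PySem.List.sorted_perm labels (fun x => x) false).count_eq]
    rw [hcounts]
    exact List.Perm.map _ ((List.perm_ext_iff_of_nodup (PySem.Set.nodup_ofList _)
      (PySem.Set.nodup_ofList _)).mpr (fun a => by
        simp only [PySem.Set.mem_ofList, hsl, PySem.List.mem_sorted]))
  · exact runCounts_pairwise sl.length sl le_rfl hslp
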